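-- pv_equiv track=rewrite | github.com/ccyenoc/unmute | backend/services/emotion_detector.py | _default_labels_for_size
-- ===== SOURCE A (Python) =====
-- from typing import Any, Dict, List, Optional, Tuple
--
-- EMOTION_LABELS = ["angry", "disgust", "fear", "happy", "sad", "surprise", "neutral"]
--
-- DEFAULT_FEN_LABELS = ["angry", "disgust", "fear", "happy", "neutral", "sad", "surprise"]
--
-- def _default_labels_for_size(size: int) -> List[str]:
--     if size <= 0:
--         return list(DEFAULT_FEN_LABELS)
--
--     labels = list(DEFAULT_FEN_LABELS)
--     if size <= len(labels):
--         return labels[:size]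
--
--     extras_needed = size - len(labels)
--     extras = [label for label in EMOTION_LABELS if label not in labels]
--     labels.extend(extras[:extras_needed])
--     if len(labels) < size:
--         labels.extend([f"class_{idx}" for idx in range(len(labels), size)])
--     return labels
-- ===== SOURCE B (Python) =====
-- from typing import List
--
-- EMOTION_LABELS = ["angry", "disgust", "fear", "happy", "sad", "surprise", "neutral"]
--
-- DEFAULT_FEN_LABELS = ["angry", "disgust", "fear", "happy", "neutral", "sad", "surprise"]
--
-- def _default_labels_for_size(size: int) -> List[str]:
--     if size <= 0:
--         return list(DEFAULT_FEN_LABELS)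
--     return [DEFAULT_FEN_LABELS[i] if i < len(DEFAULT_FEN_LABELS) else f"class_{i}"
--             for i in range(size)]
-- ===== Notes on version B (the rewrite author's own statement) =====
-- stated objective: simpler
-- what changed: Replaced A's multi-stage staging (copy, slice, extras filter, two conditional extends) by a single index-driven pass over range(size) that picks DEFAULT_FEN_LABELS[i] or f"class_{i}" per index; the extras stage is dropped because EMOTION_LABELS and DEFAULT_FEN_LABELS hold the same set, so extras is always empty.
import Mathlib
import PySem

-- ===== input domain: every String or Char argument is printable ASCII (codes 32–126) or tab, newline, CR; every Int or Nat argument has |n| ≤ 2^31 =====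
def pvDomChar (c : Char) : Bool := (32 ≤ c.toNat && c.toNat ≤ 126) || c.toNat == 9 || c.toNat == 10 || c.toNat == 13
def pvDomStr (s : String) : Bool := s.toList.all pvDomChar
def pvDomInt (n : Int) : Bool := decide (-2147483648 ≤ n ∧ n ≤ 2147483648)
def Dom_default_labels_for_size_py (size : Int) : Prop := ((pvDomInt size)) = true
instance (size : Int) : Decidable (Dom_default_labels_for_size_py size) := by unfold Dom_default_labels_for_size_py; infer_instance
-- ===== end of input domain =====

-- B builds the list in a single index-driven pass instead of A's slice/extras/extend staging (objective: simpler).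

-- ===== PORT A =====
def EMOTION_LABELS : List String := ["angry", "disgust", "fear", "happy", "sad", "surprise", "neutral"]

def DEFAULT_FEN_LABELS : List String := ["angry", "disgust", "fear", "happy", "neutral", "sad", "surprise"]

def default_labels_for_size_py (size : Int) : List String :=
  if size ≤ 0 then DEFAULT_FEN_LABELS
  else
    let labels := DEFAULT_FEN_LABELS
    if size ≤ PySem.List.len labels then PySem.List.slice labels none (some size)
    else
      let extras_needed := size - PySem.List.len labels
      let extras := EMOTION_LABELS.filter (fun l => !(labels.contains l))
      let labels := labels ++ PySem.List.slice extras none (some extras_needed)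
      if PySem.List.len labels < size then
        labels ++ (PySem.List.pyRange (PySem.List.len labels) size 1).map
          (fun idx => "class_" ++ PySem.Int.toStr idx)
      else labels

-- ===== PORT B =====
def default_labels_for_size_py_alt (size : Int) : List String :=
  if size ≤ 0 then DEFAULT_FEN_LABELS
  else
    (PySem.List.pyRange 0 size 1).map (fun i =>
      if i < PySem.List.len DEFAULT_FEN_LABELS then PySem.List.pyGetD DEFAULT_FEN_LABELS i ""
      else "class_" ++ PySem.Int.toStr i)

-- ===== PRECONDITION & SPEC =====
def Spec_default_labels_for_size_py (size : Int) (out : List String) : Prop := out = default_labels_for_size_py_alt size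
instance (size : Int) (out : List String) : Decidable (Spec_default_labels_for_size_py size out) := by unfold Spec_default_labels_for_size_py; infer_instance

-- ===== CLAIM (what is proved, stated in full; the proofs are below) =====
def Claim_equal_default_labels_for_size_py : Prop := ∀ (size : Int), Dom_default_labels_for_size_py size → Spec_default_labels_for_size_py size (default_labels_for_size_py size)

-- ===== LEMMAS AND PROOFS =====

-- For size > 7, A's extras stage vanishes and A is the seven defaults followed by class_ labels.
theorem portA_big (size : Int) (h : 7 < size) :
    default_labels_for_size_py size =
      DEFAULT_FEN_LABELS ++ (PySem.List.pyRange 7 size 1).map (fun idx => "class_" ++ PySem.Int.toStr idx) := by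
  have hlen : PySem.List.len DEFAULT_FEN_LABELS = 7 := by decide
  have hextras : EMOTION_LABELS.filter (fun l => !(DEFAULT_FEN_LABELS.contains l)) = [] := by decide
  simp only [default_labels_for_size_py, hextras]
  rw [if_neg (by omega)]
  simp only [hlen]
  rw [if_neg (by omega)]
  have hsl : PySem.List.slice ([] : List String) none (some (size - 7)) = [] := by
    simp [PySem.List.slice]
  simp only [hsl, List.append_nil]
  rw [if_pos (by rw [hlen]; omega)]
  rw [hlen]

-- For size > 7, B splits into the seven defaults and the class_ tail.
theorem portB_big (size : Int) (h : 7 < size) :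
    default_labels_for_size_py_alt size =
      DEFAULT_FEN_LABELS ++ (PySem.List.pyRange 7 size 1).map (fun idx => "class_" ++ PySem.Int.toStr idx) := by
  simp only [default_labels_for_size_py_alt]
  rw [if_neg (by omega)]
  rw [PySem.List.pyRange_one_append 0 7 size (by omega) (by omega), List.map_append]
  have h1 : (PySem.List.pyRange 0 7 1).map (fun i =>
      if i < PySem.List.len DEFAULT_FEN_LABELS then PySem.List.pyGetD DEFAULT_FEN_LABELS i ""
      else "class_" ++ PySem.Int.toStr i) = DEFAULT_FEN_LABELS := by decide
  have h2 : (PySem.List.pyRange 7 size 1).map (fun i =>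
      if i < PySem.List.len DEFAULT_FEN_LABELS then PySem.List.pyGetD DEFAULT_FEN_LABELS i ""
      else "class_" ++ PySem.Int.toStr i) =
      (PySem.List.pyRange 7 size 1).map (fun idx => "class_" ++ PySem.Int.toStr idx) := by
    refine List.map_congr_left (fun i hi => ?_)
    rw [PySem.List.mem_pyRange_one] at hi
    rw [if_neg (by simp [DEFAULT_FEN_LABELS, PySem.List.len]; omega)]
  rw [h1, h2]

-- ===== VERDICT (by name: the statement is the Claim_ definition above) =====
theorem default_labels_for_size_py_spec : Claim_equal_default_labels_for_size_py := by
  intro size _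
  unfold Spec_default_labels_for_size_py
  by_cases h7 : 7 < size
  · rw [portA_big size h7, portB_big size h7]
  · by_cases h0 : size ≤ 0
    · simp [default_labels_for_size_py, default_labels_for_size_py_alt, h0]
    · interval_cases size <;> decide
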